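-- pv_equiv track=rewrite | github.com/CodyBuilder-dev/Algorithm-Coding-Test | problems/algospot/FANMEETING-wrong.py | calc
-- ===== SOURCE A (Python) =====
-- def calc(members,fans):
--     members = ''.join(['1' if m == 'F' else '0' for m in members ])
--     fans = ''.join(['1' if f == 'F' else '0' for f in fans])
--
--     count = 0
--     for i in range(0,len(fans)-len(members)+1):
--         result = int(fans[i:i+len(members)],2) | int(members,2)
--         if result == 2**len(members)-1:
--             count += 1
--     return count
-- ===== SOURCE B (Python) =====
-- def calc(members, fans):
--     L = len(members)
--     mask = (1 << L) - 1
--     M = 0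
--     for m in members:
--         M = M * 2 + (1 if m == 'F' else 0)
--     F = 0
--     for f in fans:
--         F = F * 2 + (1 if f == 'F' else 0)
--     count = 0
--     for s in range(len(fans) - L + 1):
--         if ((F >> s) | M) & mask == mask:
--             count += 1
--     return count
-- ===== Notes on version B (the rewrite author's own statement) =====
-- stated objective: alternative
-- what changed: B parses each string into a big integer once and tests every alignment with a single shift/or/and on the fan integer, instead of re-slicing and re-parsing a fresh binary string with int(.,2) for every window as A does.
import Mathlib
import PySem

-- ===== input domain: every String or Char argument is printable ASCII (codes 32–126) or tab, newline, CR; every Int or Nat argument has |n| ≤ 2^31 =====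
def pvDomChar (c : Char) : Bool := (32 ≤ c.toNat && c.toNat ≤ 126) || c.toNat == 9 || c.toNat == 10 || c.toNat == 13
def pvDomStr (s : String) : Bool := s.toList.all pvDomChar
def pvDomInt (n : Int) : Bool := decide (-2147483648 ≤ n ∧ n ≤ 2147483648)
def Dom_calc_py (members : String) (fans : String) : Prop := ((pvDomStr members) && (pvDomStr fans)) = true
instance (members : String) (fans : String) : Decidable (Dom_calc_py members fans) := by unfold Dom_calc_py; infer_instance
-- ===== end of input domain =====

-- B parses each string into one big integer once and tests each alignment with shift/or/and,
-- instead of A's per-window string slice + int(.,2) reparse (alternative algorithm, same asymptotics).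

-- ===== PORT A =====
-- int(s, 2) ported by hand: exact for nonempty strings of '0'/'1' characters, which is the
-- only way A calls it apart from the empty string (where Python raises; excluded by Pre_).
def pvParse2 (l : List Char) : Nat :=
  l.foldl (fun a c => a * 2 + (if c = '1' then 1 else 0)) 0

def calc_py (members : String) (fans : String) : Int :=
  let ml : List Char := members.toList.map (fun m => if m = 'F' then '1' else '0')
  let fl : List Char := fans.toList.map (fun f => if f = 'F' then '1' else '0')
  (PySem.List.pyRange 0 ((fl.length : Int) - (ml.length : Int) + 1) 1).foldl
    (fun count i =>
      let result := pvParse2 (PySem.List.slice fl (some i) (some (i + (ml.length : Int)))) ||| pvParse2 ml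
      if result = 2 ^ ml.length - 1 then count + 1 else count) 0

-- ===== PORT B =====
def calc_py_alt (members : String) (fans : String) : Int :=
  let L : Nat := members.toList.length
  let mask : Nat := (1 <<< L) - 1
  let M : Nat := members.toList.foldl (fun a m => a * 2 + (if m = 'F' then 1 else 0)) 0
  let F : Nat := fans.toList.foldl (fun a f => a * 2 + (if f = 'F' then 1 else 0)) 0
  (PySem.List.pyRange 0 ((fans.toList.length : Int) - (L : Int) + 1) 1).foldl
    (fun count s => if ((F >>> s.toNat) ||| M) &&& mask = mask then count + 1 else count) 0
  -- s ranges over 0..len(fans)-L, so s.toNat is exact for Python's nonnegative shift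

-- ===== PRECONDITION & SPEC =====
-- Pre_ excludes only members = "", where A raises ValueError (int('',2)).
def Pre_calc_py (members : String) (fans : String) : Prop := members ≠ ""
instance (members : String) (fans : String) : Decidable (Pre_calc_py members fans) := by
  unfold Pre_calc_py; infer_instance

def pvWitness_calc_py : String × String := ("FM", "FFMF")

def Spec_calc_py (members : String) (fans : String) (out : Int) : Prop := out = calc_py_alt members fans
instance (members : String) (fans : String) (out : Int) : Decidable (Spec_calc_py members fans out) := by unfold Spec_calc_py; infer_instance

-- ===== CLAIM (what is proved, stated in full; the proofs are below) =====
def Claim_equal_calc_py : Prop := ∀ (members : String) (fans : String), Dom_calc_py members fans → Pre_calc_py members fans → Spec_calc_py members fans (calc_py members fans)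


-- ===== LEMMAS AND PROOFS =====

-- value of a bitstring under B's fold
def pvVal (l : List Char) : Nat :=
  l.foldl (fun a c => a * 2 + (if c = 'F' then 1 else 0)) 0

theorem pvVal_foldl_from (l : List Char) (a : Nat) :
    l.foldl (fun a c => a * 2 + (if c = 'F' then 1 else 0)) a = a * 2 ^ l.length + pvVal l := by
  induction l generalizing a with
  | nil => simp [pvVal]
  | cons c l ih =>
    have h0 : pvVal (c :: l) = l.foldl (fun a c => a * 2 + (if c = 'F' then 1 else 0))
        (if c = 'F' then 1 else 0) := by
      simp [pvVal]
    simp only [List.foldl_cons, List.length_cons, h0]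
    rw [ih, ih]
    ring

theorem pvVal_append (l₁ l₂ : List Char) :
    pvVal (l₁ ++ l₂) = pvVal l₁ * 2 ^ l₂.length + pvVal l₂ := by
  show (l₁ ++ l₂).foldl _ 0 = _
  rw [List.foldl_append, pvVal_foldl_from]
  rfl

theorem pvVal_lt (l : List Char) : pvVal l < 2 ^ l.length := by
  induction l with
  | nil => simp [pvVal]
  | cons c l ih =>
    have h0 : pvVal (c :: l) = l.foldl (fun a c => a * 2 + (if c = 'F' then 1 else 0))
        (if c = 'F' then 1 else 0) := by
      simp [pvVal]
    rw [h0, pvVal_foldl_from]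
    have hb : (if c = 'F' then 1 else 0 : Nat) ≤ 1 := by split <;> simp
    have h1 : (if c = 'F' then 1 else 0 : Nat) * 2 ^ l.length ≤ 2 ^ l.length :=
      le_trans (Nat.mul_le_mul_right _ hb) (by simp)
    have h2 : (2 : Nat) ^ (c :: l).length = 2 ^ l.length * 2 := by
      simp [List.length_cons, pow_succ]
    omega

theorem pvParse2_map (l : List Char) :
    pvParse2 (l.map (fun m => if m = 'F' then '1' else '0')) = pvVal l := by
  rw [pvParse2, List.foldl_map]
  show l.foldl _ 0 = pvVal l
  unfold pvVal
  congr 1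
  funext a c
  by_cases h : c = 'F' <;> simp [h]

-- key bit lemma: bits above the window and the final masking cancel
theorem pvKeyBits (a w m L : Nat) (hw : w < 2 ^ L) (hm : m < 2 ^ L) :
    ((a * 2 ^ L + w) ||| m) &&& (2 ^ L - 1) = w ||| m := by
  apply Nat.eq_of_testBit_eq
  intro j
  simp only [Nat.testBit_land, Nat.testBit_lor, Nat.testBit_two_pow_sub_one]
  by_cases hj : j < L
  · have hmod : (a * 2 ^ L + w) % 2 ^ L = w := by
      rw [add_comm, Nat.add_mul_mod_self_right, Nat.mod_eq_of_lt hw]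
    have hbit : (a * 2 ^ L + w).testBit j = w.testBit j := by
      have h := Nat.testBit_mod_two_pow (a * 2 ^ L + w) L j
      rw [hmod] at h
      simp [hj] at h
      exact h.symm
    simp [hj, hbit]
  · have hLe : (2 : Nat) ^ L ≤ 2 ^ j := Nat.pow_le_pow_right (by norm_num) (Nat.le_of_not_lt hj)
    have hwb : w.testBit j = false := Nat.testBit_lt_two_pow (lt_of_lt_of_le hw hLe)
    have hmb : m.testBit j = false := Nat.testBit_lt_two_pow (lt_of_lt_of_le hm hLe)
    simp [hj, hwb, hmb]

-- a counting fold is countP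
theorem pvFoldCount {α : Type} (p : α → Prop) [DecidablePred p] (l : List α) (c : Int) :
    l.foldl (fun c x => if p x then c + 1 else c) c
      = c + ((l.countP (fun x => decide (p x)) : Nat) : Int) := by
  induction l generalizing c with
  | nil => simp
  | cons x l ih =>
    simp only [List.foldl_cons, List.countP_cons, ih]
    by_cases h : p x
    · simp [h]
      ring
    · simp [h]

-- countP over List.range as a Finset sum
theorem pvCountP_range (p : Nat → Bool) (K : Nat) :
    (((List.range K).countP p : Nat) : Int) = ∑ k ∈ Finset.range K, (if p k then (1 : Int) else 0) := by
  induction K with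
  | zero => simp
  | succ K ih =>
    rw [List.range_succ, List.countP_append, Finset.sum_range_succ, ← ih]
    by_cases h : p K <;> simp [h]

-- a counting fold over pyRange 0 N 1 as a Finset sum
theorem pvFold_range (cond : Int → Prop) [DecidablePred cond] (N : Int) (c : Int) :
    (PySem.List.pyRange 0 N 1).foldl (fun c x => if cond x then c + 1 else c) c
      = c + ∑ k ∈ Finset.range N.toNat, (if cond (k : Int) then (1 : Int) else 0) := by
  rw [PySem.List.pyRange_one, List.foldl_map, sub_zero]
  rw [pvFoldCount (fun k : Nat => cond (0 + (k : Int)))]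
  rw [pvCountP_range]
  congr 1
  exact Finset.sum_congr rfl fun k _ => by rw [zero_add]; simp

-- the window condition of A equals the shift condition of B at the reflected index
theorem pvCond_eq (ms t : List Char) (k : Nat) (hk : k + ms.length ≤ t.length) :
    (pvVal ((t.drop k).take ms.length) ||| pvVal ms = 2 ^ ms.length - 1 ↔
     ((pvVal t >>> (t.length - ms.length - k)) ||| pvVal ms) &&& ((1 <<< ms.length) - 1)
       = (1 <<< ms.length) - 1) := by
  set L := ms.length with hLdef
  set n := t.length with hndef
  set s := n - L - k with hsdef
  have hdl : (t.drop (k + L)).length = s := by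
    simp only [List.length_drop]
    omega
  have h1 : pvVal t = pvVal (t.take (k + L)) * 2 ^ s + pvVal (t.drop (k + L)) := by
    conv_lhs => rw [← List.take_append_drop (k + L) t]
    rw [pvVal_append, hdl]
  have h2 : pvVal t >>> s = pvVal (t.take (k + L)) := by
    rw [Nat.shiftRight_eq_div_pow, h1, add_comm,
      Nat.add_mul_div_right _ _ (by positivity : 0 < 2 ^ s),
      Nat.div_eq_of_lt (hdl ▸ pvVal_lt (t.drop (k + L)))]
    simp
  have hwlen : ((t.drop k).take L).length = L := by
    simp only [List.length_take, List.length_drop]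
    omega
  have hw : pvVal ((t.drop k).take L) < 2 ^ L := by
    have h := pvVal_lt ((t.drop k).take L)
    rwa [hwlen] at h
  have h4 : pvVal (t.take (k + L)) = pvVal (t.take k) * 2 ^ L + pvVal ((t.drop k).take L) := by
    rw [List.take_add, pvVal_append, hwlen]
  have hm : pvVal ms < 2 ^ L := pvVal_lt ms
  rw [Nat.one_shiftLeft, h2, h4, pvKeyBits _ _ _ _ hw hm]

theorem calc_py_spec : Claim_equal_calc_py := by
  intro members fans _ _
  unfold Spec_calc_py calc_py calc_py_alt
  simp only [List.length_map]
  set ms := members.toList with hms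
  set t := fans.toList with ht
  rw [pvFold_range, pvFold_range, zero_add, zero_add]
  have hMB : ms.foldl (fun a m => a * 2 + (if m = 'F' then 1 else 0)) 0 = pvVal ms := rfl
  have hFB : t.foldl (fun a f => a * 2 + (if f = 'F' then 1 else 0)) 0 = pvVal t := rfl
  rw [hMB, hFB]
  rw [← Finset.sum_range_reflect]
  apply Finset.sum_congr rfl
  intro k hk
  rw [Finset.mem_range] at hk
  have hrefl : ((t.length : Int) - (ms.length : Int) + 1).toNat - 1 - k
      = t.length - ms.length - k := by omega
  rw [hrefl]
  rw [PySem.List.slice_natCast_add, Int.toNat_natCast]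
  rw [← List.map_drop, ← List.map_take, pvParse2_map, pvParse2_map]
  have hi : t.length - ms.length - (t.length - ms.length - k) = k := by omega
  have hiff := pvCond_eq ms t (t.length - ms.length - k) (by omega)
  rw [hi] at hiff
  simp only [hiff]
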